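-- pv_equiv track=rewrite | github.com/samlyme/Assignments-F2025 | MAT3100W/HW08/code/num_transitive.py | all_digraphs
-- ===== SOURCE A (Python) =====
-- import itertools
--
-- def all_digraphs(n: int):
--     if n <= 0:
--         return []
--
--     # Edge positions to toggle (ordered pairs)
--     positions = []
--     for i in range(n):
--         for j in range(n):
--             positions.append((i, j))
--
--     num_edges = len(positions)  # n*(n-1) if no self-loops; n*n if with self-loops
--
--     graphs = []
--     for bits in itertools.product([0, 1], repeat=num_edges):
--         # start with all zeros
--         adj = [[0]*n for _ in range(n)]
--         for (k, (i, j)) in enumerate(positions):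
--             adj[i][j] = bits[k]
--         # if self_loops is False, diagonal is already zero by construction
--         graphs.append(adj)
--
--     return graphs
-- ===== SOURCE B (Python) =====
-- import itertools
--
-- def all_digraphs(n: int):
--     if n <= 0:
--         return []
--     # all 2^n binary rows in lex order, then every choice of n rows (row-major counting)
--     rows = list(itertools.product([0, 1], repeat=n))
--     return [[list(r) for r in combo] for combo in itertools.product(rows, repeat=n)]
-- ===== Notes on version B (the rewrite author's own statement) =====
-- stated objective: simpler
-- what changed: B builds each adjacency matrix directly as a choice of n precomputed binary rows (product of rows) instead of enumerating n*n flat bit tuples and writing each bit into a zero matrix by (i,j) position.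
import Mathlib
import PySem

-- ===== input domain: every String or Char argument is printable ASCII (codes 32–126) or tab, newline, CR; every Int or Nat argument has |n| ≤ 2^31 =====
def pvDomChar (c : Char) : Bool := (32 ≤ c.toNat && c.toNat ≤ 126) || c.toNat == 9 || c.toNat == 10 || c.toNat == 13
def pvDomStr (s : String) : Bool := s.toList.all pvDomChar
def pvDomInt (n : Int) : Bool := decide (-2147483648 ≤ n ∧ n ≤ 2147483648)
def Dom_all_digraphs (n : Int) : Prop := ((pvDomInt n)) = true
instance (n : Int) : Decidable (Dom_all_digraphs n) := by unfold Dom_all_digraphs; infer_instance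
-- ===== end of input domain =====

-- B builds each matrix as a choice of n precomputed binary rows instead of writing n*n bits
-- into a zero matrix cell by cell; same output order (row-major base-2 counting). Objective: simpler.

-- ===== PORT A =====
-- itertools.product(xs, repeat=k) in lexicographic order (both Pythons call itertools.product)
def pvProduct {α : Type} (xs : List α) : Nat → List (List α)
  | 0 => [[]]
  | k + 1 => xs.flatMap (fun x => (pvProduct xs k).map (x :: ·))

-- positions = [(i, j) for i in range(n) for j in range(n)] built by appends
def pvPositions (n : Int) : List (Int × Int) :=
  (PySem.List.pyRange 0 n 1).foldl (fun acc i =>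
    (PySem.List.pyRange 0 n 1).foldl (fun acc2 j => acc2 ++ [(i, j)]) acc) []

-- adj = [[0]*n for _ in range(n)]; then adj[i][j] = bits[k] for (k,(i,j)) in enumerate(positions)
-- (n > 0 at the call site so n.toNat is exact; i, j, k are always in range, so pyGetD/pySetD are exact)
def pvBuildAdj (n : Int) (bits : List Int) : List (List Int) :=
  (PySem.List.enumerate (pvPositions n) 0).foldl (fun adj kij =>
      PySem.List.pySetD adj kij.2.1
        (PySem.List.pySetD (PySem.List.pyGetD adj kij.2.1 []) kij.2.2
          (PySem.List.pyGetD bits kij.1 0)))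
    (List.replicate n.toNat (List.replicate n.toNat (0 : Int)))

def all_digraphs (n : Int) : List (List (List Int)) :=
  if n ≤ 0 then []
  else
    (pvProduct ([0, 1] : List Int) (pvPositions n).length).foldl
      (fun graphs bits => graphs ++ [pvBuildAdj n bits]) []

-- ===== PORT B =====
-- [[list(r) for r in combo] for combo in product(rows, repeat=n)]; list(r) copies a row
def all_digraphs_alt (n : Int) : List (List (List Int)) :=
  if n ≤ 0 then []
  else
    (pvProduct (pvProduct ([0, 1] : List Int) n.toNat) n.toNat).map
      (fun combo => combo.map (fun r => r))

-- ===== PRECONDITION & SPEC =====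
def Spec_all_digraphs (n : Int) (out : List (List (List Int))) : Prop := out = all_digraphs_alt n
instance (n : Int) (out : List (List (List Int))) : Decidable (Spec_all_digraphs n out) := by unfold Spec_all_digraphs; infer_instance

-- ===== CLAIM (what is proved, stated in full; the proofs are below) =====
def Claim_equal_all_digraphs : Prop := ∀ (n : Int), Dom_all_digraphs n → Spec_all_digraphs n (all_digraphs n)

-- ===== LEMMAS AND PROOFS =====

-- split a flat bit list into k rows of length N
def chunkK (N : Nat) : Nat → List Int → List (List Int)
  | 0, _ => []
  | k + 1, bits => bits.take N :: chunkK N k (bits.drop N)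

theorem length_of_mem_pvProduct {α : Type} (xs : List α) :
    ∀ (k : Nat) (u : List α), u ∈ pvProduct xs k → u.length = k := by
  intro k
  induction k with
  | zero => intro u hu; simp [pvProduct] at hu; simp [hu]
  | succ k ih =>
    intro u hu
    simp only [pvProduct, List.mem_flatMap, List.mem_map] at hu
    obtain ⟨x, _, v, hv, rfl⟩ := hu
    simp [ih v hv]

theorem pvProduct_add {α : Type} (xs : List α) (a b : Nat) :
    pvProduct xs (a + b) =
      (pvProduct xs a).flatMap (fun u => (pvProduct xs b).map (u ++ ·)) := by
  induction a with
  | zero => simp [pvProduct]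
  | succ a ih =>
    have h : a + 1 + b = (a + b) + 1 := by omega
    rw [h]
    simp only [pvProduct, ih]
    simp [List.map_flatMap, List.flatMap_assoc, List.flatMap_map, List.map_map,
      Function.comp_def, List.cons_append]

theorem map_chunkK_pvProduct (xs : List Int) (N : Nat) :
    ∀ (k : Nat), (pvProduct xs (N * k)).map (chunkK N k) = pvProduct (pvProduct xs N) k := by
  intro k
  induction k with
  | zero => simp [pvProduct, chunkK]
  | succ k ih =>
    have h : N * (k + 1) = N + N * k := by ring
    rw [h, pvProduct_add, List.map_flatMap]
    have hcongr : ∀ u ∈ pvProduct xs N,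
        ((pvProduct xs (N * k)).map (u ++ ·)).map (chunkK N (k + 1))
          = (pvProduct (pvProduct xs N) k).map (u :: ·) := by
      intro u hu
      rw [List.map_map, ← ih, List.map_map]
      apply List.map_congr_left
      intro v _
      have hlen : u.length = N := length_of_mem_pvProduct xs N u hu
      simp only [Function.comp, chunkK]
      rw [← hlen, List.take_left, List.drop_left]
    rw [List.flatMap_congr hcongr]
    rfl

-- writing f j into slot j for j = 0..m-1 of a long-enough list
theorem rowFillAux {α : Type} (f : Nat → α) :
    ∀ (m : Nat) (row : List α), m ≤ row.length →
      (List.range m).foldl (fun r j => r.set j (f j)) row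
        = (List.range m).map f ++ row.drop m := by
  intro m
  induction m with
  | zero => intro row _; simp
  | succ m ih =>
    intro row hm
    have hdrop : row.drop m = row[m] :: row.drop (m + 1) :=
      List.drop_eq_getElem_cons (by omega)
    rw [List.range_succ, List.foldl_append, List.map_append]
    simp only [List.foldl_cons, List.foldl_nil]
    rw [ih row (by omega), hdrop, List.set_append_right _ _ (by simp)]
    simp
    rw [hdrop, List.set_cons_zero]

theorem rowFill {α : Type} (f : Nat → α) (N : Nat) (row : List α) (h : row.length = N) :
    (List.range N).foldl (fun r j => r.set j (f j)) row = (List.range N).map f := by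
  rw [rowFillAux f N row (by omega)]
  simp [h]

-- repeated writes into the same outer slot i collapse to one outer set
theorem foldl_setCell (i : Nat) (v : Nat → Int) :
    ∀ (js : List Nat) (adj : List (List Int)), i < adj.length →
      js.foldl (fun a j => a.set i ((a.getD i []).set j (v j))) adj
        = adj.set i (js.foldl (fun r j => r.set j (v j)) (adj.getD i [])) := by
  intro js
  induction js with
  | nil =>
    intro adj hi
    simp [List.getD_eq_getElem?_getD, List.getElem?_eq_getElem hi,
      List.set_getElem_self hi]
  | cons j js ih =>
    intro adj hi
    simp only [List.foldl_cons]
    rw [ih _ (by simpa using hi)]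
    have hgd : ((adj.set i ((adj.getD i []).set j (v j))).getD i [])
        = (adj.getD i []).set j (v j) := by
      rw [List.getD_eq_getElem?_getD, List.getElem?_set_self (by omega)]
      rfl
    rw [hgd, List.set_set]

theorem enumerate_map_range {α : Type} (h : Nat → α) :
    ∀ (N : Nat) (s : Int),
      PySem.List.enumerate ((List.range N).map h) s
        = (List.range N).map (fun (j : Nat) => (s + (j : Int), h j)) := by
  intro N
  induction N with
  | zero => intro s; simp [PySem.List.enumerate_nil]
  | succ N ih =>
    intro s
    rw [List.range_succ, List.map_append, PySem.List.enumerate_append, ih, List.map_append]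
    simp [PySem.List.enumerate_cons, PySem.List.enumerate_nil]

theorem enum_flatMap (N : Nat) :
    ∀ (m s : Nat),
      PySem.List.enumerate ((List.range' s m).flatMap
          (fun (i : Nat) => (List.range N).map (fun (j : Nat) => ((i : Int), (j : Int))))) ((s * N : Nat) : Int)
        = (List.range' s m).flatMap
            (fun (i : Nat) => (List.range N).map (fun (j : Nat) => (((i * N + j : Nat) : Int), ((i : Int), (j : Int))))) := by
  intro m
  induction m with
  | zero => intro s; simp [PySem.List.enumerate_nil]
  | succ m ih =>
    intro s
    have hr : List.range' s (m + 1) = s :: List.range' (s + 1) m := rfl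
    rw [hr]
    simp only [List.flatMap_cons]
    rw [PySem.List.enumerate_append, enumerate_map_range]
    have hcast : ((s * N : Nat) : Int) + (((List.range N).map (fun (j : Nat) => ((s : Int), (j : Int)))).length : Int)
        = (((s + 1) * N : Nat) : Int) := by push_cast [List.length_map, List.length_range]; ring
    rw [hcast, ih (s + 1)]
    have hhd : ∀ j ∈ List.range N,
        (((s * N : Nat) : Int) + (j : Int), ((s : Int), (j : Int)))
          = (((s * N + j : Nat) : Int), ((s : Int), (j : Int))) := by
      intro j _; push_cast; ring_nf
    rw [List.map_congr_left hhd]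

-- (range m).map getD recovers take m
theorem map_getD_eq_take (m : Nat) (bits : List Int) (h : m ≤ bits.length) :
    (List.range m).map (fun j => bits.getD j 0) = bits.take m := by
  apply List.ext_getElem
  · simp [h]
  · intro t h1 h2
    simp only [List.getElem_map, List.getElem_range, List.getElem_take]
    rw [List.getD_eq_getElem?_getD, List.getElem?_eq_getElem (by simp at h1; omega)]
    rfl

theorem map_rowVal_eq_chunkK (N : Nat) :
    ∀ (k : Nat) (bits : List Int), bits.length = N * k →
      (List.range k).map (fun (i : Nat) => (List.range N).map (fun j => bits.getD (i * N + j) 0))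
        = chunkK N k bits := by
  intro k
  induction k with
  | zero => intro bits _; simp [chunkK]
  | succ k ih =>
    intro bits hb
    rw [List.range_succ_eq_map]
    simp only [List.map_cons, List.map_map]
    rw [chunkK]
    congr 1
    · simp only [Nat.zero_mul, Nat.zero_add]
      exact map_getD_eq_take N bits (by rw [hb]; exact Nat.le_mul_of_pos_right N (Nat.succ_pos k))
    · rw [← ih (bits.drop N) (by simp [hb, Nat.mul_succ])]
      apply List.map_congr_left
      intro i _
      simp only [Function.comp]
      apply List.map_congr_left
      intro j _
      have harith : (i + 1) * N + j = N + (i * N + j) := by ring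
      rw [harith, List.getD_eq_getElem?_getD, List.getD_eq_getElem?_getD,
        List.getElem?_drop]

-- the whole position-indexed fold builds the matrix row by row
theorem matFold (N : Nat) (bits : List Int) :
    ∀ (is : List Nat) (adj : List (List Int)),
      (∀ i ∈ is, i < adj.length) → (∀ i ∈ is, (adj.getD i []).length = N) →
      (is.flatMap (fun (i : Nat) => (List.range N).map
          (fun (j : Nat) => (((i * N + j : Nat) : Int), ((i : Int), (j : Int)))))).foldl
        (fun adj kij =>
          PySem.List.pySetD adj kij.2.1
            (PySem.List.pySetD (PySem.List.pyGetD adj kij.2.1 []) kij.2.2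
              (PySem.List.pyGetD bits kij.1 0))) adj
      = is.foldl (fun a i =>
          a.set i ((List.range N).map (fun j => bits.getD (i * N + j) 0))) adj := by
  intro is
  induction is with
  | nil => intro adj _ _; simp
  | cons i is ih =>
    intro adj h1 h2
    simp only [List.flatMap_cons, List.foldl_append, List.foldl_cons]
    rw [List.foldl_map]
    have hstep : (fun (adj : List (List Int)) (j : Nat) =>
        PySem.List.pySetD adj ((i : Int))
          (PySem.List.pySetD (PySem.List.pyGetD adj ((i : Int)) []) ((j : Int))
            (PySem.List.pyGetD bits (((i * N + j : Nat) : Int)) 0)))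
        = (fun (a : List (List Int)) (j : Nat) =>
            a.set i ((a.getD i []).set j (bits.getD (i * N + j) 0))) := by
      funext a j
      simp only [PySem.List.pySetD_natCast, PySem.List.pyGetD_natCast]
    rw [hstep]
    have hi : i < adj.length := h1 i (by simp)
    rw [foldl_setCell i _ (List.range N) adj hi]
    rw [rowFill _ N _ (h2 i (by simp))]
    rw [ih]
    · intro i' hi'
      rw [List.length_set]; exact h1 i' (by simp [hi'])
    · intro i' hi'
      by_cases hii : i' = i
      · subst hii
        rw [List.getD_eq_getElem?_getD, List.getElem?_set_self (by omega)]
        simp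
      · rw [List.getD_eq_getElem?_getD, List.getElem?_set_ne (by omega)]
        rw [← List.getD_eq_getElem?_getD]
        exact h2 i' (by simp [hi'])

-- positions as a flatMap over Nat ranges (n > 0)
theorem positions_eq (n : Int) (N : Nat) (hnN : n = (N : Int)) :
    pvPositions n = (List.range N).flatMap (fun (i : Nat) => (List.range N).map
      (fun (j : Nat) => ((i : Int), (j : Int)))) := by
  unfold pvPositions
  have hrange : PySem.List.pyRange 0 n 1 = (List.range N).map (fun (i : Nat) => (i : Int)) := by
    rw [hnN]; exact PySem.List.pyRange_zero_natCast N
  have hinner : ∀ (acc : List (Int × Int)) (i : Int),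
      (PySem.List.pyRange 0 n 1).foldl (fun acc2 j => acc2 ++ [(i, j)]) acc
        = acc ++ (PySem.List.pyRange 0 n 1).map (fun j => (i, j)) :=
    fun acc i => PySem.List.foldl_append_singleton_eq_map _ _ _
  rw [show (fun (acc : List (Int × Int)) (i : Int) =>
        (PySem.List.pyRange 0 n 1).foldl (fun acc2 j => acc2 ++ [(i, j)]) acc)
      = (fun acc i => acc ++ (PySem.List.pyRange 0 n 1).map (fun j => (i, j)))
    from funext fun acc => funext fun i => hinner acc i]
  rw [PySem.List.foldl_append_eq_flatMap, List.nil_append, hrange, List.flatMap_map]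
  simp [Function.comp_def, List.map_map]

theorem length_positions (n : Int) (N : Nat) (hnN : n = (N : Int)) :
    (pvPositions n).length = N * N := by
  rw [positions_eq n N hnN]
  simp [List.length_flatMap]

-- for each bit tuple, A's cell-by-cell build equals the row chunking of the bits
theorem buildAdj_eq_chunkK (n : Int) (N : Nat) (hnN : n = (N : Int))
    (bits : List Int) (hb : bits.length = N * N) :
    pvBuildAdj n bits = chunkK N N bits := by
  unfold pvBuildAdj
  rw [positions_eq n N hnN]
  have henum : PySem.List.enumerate ((List.range N).flatMap (fun (i : Nat) => (List.range N).map
      (fun (j : Nat) => ((i : Int), (j : Int))))) 0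
      = (List.range N).flatMap (fun (i : Nat) => (List.range N).map
          (fun (j : Nat) => (((i * N + j : Nat) : Int), ((i : Int), (j : Int))))) := by
    have := enum_flatMap N N 0
    simpa [List.range_eq_range'] using this
  rw [henum]
  have hnn : n.toNat = N := by omega
  rw [hnn]
  rw [matFold N bits (List.range N) (List.replicate N (List.replicate N (0 : Int)))
      (by intro i hi; simp at hi ⊢; omega)
      (by intro i hi; simp at hi
          rw [List.getD_eq_getElem?_getD, List.getElem?_replicate, if_pos hi]
          simp)]
  rw [rowFill _ N _ (by simp)]
  exact map_rowVal_eq_chunkK N N bits hb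

-- ===== VERDICT (by name: the statement is the Claim_ definition above) =====
theorem all_digraphs_spec : Claim_equal_all_digraphs := by
  intro n _
  unfold Spec_all_digraphs all_digraphs all_digraphs_alt
  by_cases hn : n ≤ 0
  · simp [hn]
  · rw [if_neg hn, if_neg hn]
    rw [not_le] at hn
    have hnN : n = ((n.toNat : Nat) : Int) := by omega
    set N := n.toNat with hN
    rw [PySem.List.foldl_append_singleton_eq_map, List.nil_append,
      length_positions n N hnN]
    rw [List.map_congr_left (fun bits hb =>
      buildAdj_eq_chunkK n N hnN bits (length_of_mem_pvProduct _ _ _ hb))]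
    rw [map_chunkK_pvProduct ([0, 1] : List Int) N N]
    simp
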